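-- pv_equiv track=rewrite | github.com/agustinpriano/parcial-tecnicas-programacion | ejercicio3.py | diccionarioEquipos
-- ===== SOURCE A (Python) =====
-- def diccionarioEquipos(listaDeResultados):
--     """
--         PRE: Recibo una lista de tuplas con los resultados de los partidos
--         POS: Devuelvo un diccionario donde cada clave es un equipo y para cada clave
--              hay una lista donde cada posición son los puntos correspondientes a cada partido según el resultado
--         """
--     diccionario={}
--     for x in listaDeResultados:
--         diccionario[x[0]] = []
--         diccionario[x[2]] = []
--     for x in listaDeResultados:
--         if x[1] > x[3]:  # Gano el equipo 1
--             diccionario[x[0]].append(2)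
--         if x[3] > x[1]:  # Gano el equipo 1}
--             diccionario[x[2]].append(2)
--         if x[3] == x[1]:  # x[1 es el primero alfabeticamente
--             diccionario[x[0]].append(1)
--             diccionario[x[2]].append(1)
--
--     return diccionario
-- ===== SOURCE B (Python) =====
-- def diccionarioEquipos(listaDeResultados):
--     # Per-team decomposition: collect teams in first-appearance order, then
--     # build each team's points list by one scan of the results.
--     equipos = list(dict.fromkeys(e for x in listaDeResultados for e in (x[0], x[2])))
--
--     def puntos(e):
--         pts = []
--         for a, s1, b, s2 in listaDeResultados:
--             if e == a and s1 > s2: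
--                 pts.append(2)
--             if e == b and s2 > s1:
--                 pts.append(2)
--             if s1 == s2:
--                 if e == a:
--                     pts.append(1)
--                 if e == b:
--                     pts.append(1)
--         return pts
--
--     return {e: puntos(e) for e in equipos}
-- ===== Notes on version B (the rewrite author's own statement) =====
-- stated objective: alternative
-- what changed: A builds a dict in two passes (initialize every team's key to [], then accumulate points by mutating dict entries match by match); B instead dedups the team names once and computes each team's points list independently by its own scan of the results, assembling the dict in one comprehension over distinct keys.
import Mathlib
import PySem

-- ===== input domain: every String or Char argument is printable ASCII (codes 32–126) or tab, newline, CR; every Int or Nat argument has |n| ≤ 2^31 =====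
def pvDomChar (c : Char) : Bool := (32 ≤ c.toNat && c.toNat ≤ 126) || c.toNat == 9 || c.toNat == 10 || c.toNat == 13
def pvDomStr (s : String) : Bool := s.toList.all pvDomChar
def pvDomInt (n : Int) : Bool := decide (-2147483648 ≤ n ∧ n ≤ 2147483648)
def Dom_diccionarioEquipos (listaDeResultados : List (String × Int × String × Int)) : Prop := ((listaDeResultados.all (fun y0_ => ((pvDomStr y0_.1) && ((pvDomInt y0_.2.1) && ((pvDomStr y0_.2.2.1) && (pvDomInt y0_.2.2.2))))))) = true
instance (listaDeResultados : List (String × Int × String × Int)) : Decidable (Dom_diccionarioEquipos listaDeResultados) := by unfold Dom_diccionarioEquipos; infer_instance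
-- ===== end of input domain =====

-- B replaces A's initialize-all-keys-then-accumulate dict passes by a per-team
-- decomposition (dedup the teams, then compute each team's points list by its own
-- scan of the results); equal return value, objective: alternative.

-- ===== PORT A =====
-- second loop of A: the three-way comparison; Python's `.append` acts on keys that the
-- first loop always created, so `modify` with default [] is exact here
def pvUpdStep (d : PySem.Dict String (List Int)) (x : String × Int × String × Int) : PySem.Dict String (List Int) :=
  let d1 := if x.2.1 > x.2.2.2 then d.modify x.1 [] (· ++ [2]) else d
  let d2 := if x.2.2.2 > x.2.1 then d1.modify x.2.2.1 [] (· ++ [2]) else d1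
  if x.2.2.2 = x.2.1 then (d2.modify x.1 [] (· ++ [1])).modify x.2.2.1 [] (· ++ [1]) else d2

def diccionarioEquipos (listaDeResultados : List (String × Int × String × Int)) : List (String × List Int) :=
  let d0 := listaDeResultados.foldl
    (fun d x => (d.insert x.1 ([] : List Int)).insert x.2.2.1 []) PySem.Dict.empty
  (listaDeResultados.foldl pvUpdStep d0).items

-- ===== PORT B =====
-- Source B's inner loop body `puntos`
def pvPuntosStep (e : String) (pts : List Int) (x : String × Int × String × Int) : List Int :=
  let p1 := if e = x.1 ∧ x.2.1 > x.2.2.2 then pts ++ [2] else pts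
  let p2 := if e = x.2.2.1 ∧ x.2.2.2 > x.2.1 then p1 ++ [2] else p1
  if x.2.1 = x.2.2.2 then
    let p3 := if e = x.1 then p2 ++ [1] else p2
    if e = x.2.2.1 then p3 ++ [1] else p3
  else p2

def pvPuntos (listaDeResultados : List (String × Int × String × Int)) (e : String) : List Int :=
  listaDeResultados.foldl (pvPuntosStep e) []

def diccionarioEquipos_alt (listaDeResultados : List (String × Int × String × Int)) : List (String × List Int) :=
  let equipos := PySem.List.dedup (listaDeResultados.flatMap (fun x => [x.1, x.2.2.1]))
  (equipos.foldl (fun d e => d.insert e (pvPuntos listaDeResultados e)) PySem.Dict.empty).items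

-- ===== PRECONDITION & SPEC =====
def Spec_diccionarioEquipos (listaDeResultados : List (String × Int × String × Int)) (out : List (String × List Int)) : Prop := out = diccionarioEquipos_alt listaDeResultados
instance (listaDeResultados : List (String × Int × String × Int)) (out : List (String × List Int)) : Decidable (Spec_diccionarioEquipos listaDeResultados out) := by unfold Spec_diccionarioEquipos; infer_instance

-- ===== CLAIM (what is proved, stated in full; the proofs are below) =====
def Claim_equal_diccionarioEquipos : Prop := ∀ (listaDeResultados : List (String × Int × String × Int)), Dom_diccionarioEquipos listaDeResultados → Spec_diccionarioEquipos listaDeResultados (diccionarioEquipos listaDeResultados)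

-- ===== LEMMAS AND PROOFS =====

-- the points a team e gains from a single match x, as a standalone list
def pvGain (e : String) (x : String × Int × String × Int) : List Int :=
  (if e = x.1 ∧ x.2.1 > x.2.2.2 then [2] else []) ++
  (if e = x.2.2.1 ∧ x.2.2.2 > x.2.1 then [2] else []) ++
  (if x.2.1 = x.2.2.2 then
    (if e = x.1 then [1] else []) ++ (if e = x.2.2.1 then [1] else []) else [])

theorem pvPuntosStep_eq_append (e : String) (pts : List Int) (x : String × Int × String × Int) :
    pvPuntosStep e pts x = pts ++ pvGain e x := by
  unfold pvPuntosStep pvGain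
  split_ifs <;> simp_all

theorem pvPuntos_eq_flatMap (l : List (String × Int × String × Int)) (e : String) :
    pvPuntos l e = l.flatMap (pvGain e) := by
  have hstep : pvPuntosStep e = fun pts x => pts ++ pvGain e x :=
    funext fun pts => funext fun x => pvPuntosStep_eq_append e pts x
  unfold pvPuntos
  rw [hstep]
  simpa using PySem.List.foldl_append_eq_flatMap (pvGain e) l []

theorem pvUpdStep_getD (d : PySem.Dict String (List Int)) (x : String × Int × String × Int)
    (e : String) : (pvUpdStep d x).getD e [] = d.getD e [] ++ pvGain e x := by
  obtain ⟨a, s1, b, s2⟩ := x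
  unfold pvUpdStep pvGain
  rcases lt_trichotomy s1 s2 with h | h | h
  · have h1 : ¬ s1 > s2 := by omega
    have h2 : s2 > s1 := h
    have h3 : ¬ s2 = s1 := by omega
    have h4 : ¬ s1 = s2 := by omega
    by_cases hA : e = a <;> by_cases hB : e = b <;> by_cases hab : a = b <;>
      simp [PySem.Dict.getD_modify, hA, hB, hab, h1, h2, h3, h4]
  · have h1 : ¬ s1 > s2 := by omega
    have h2 : ¬ s2 > s1 := by omega
    have h3 : s2 = s1 := h.symm
    by_cases hA : e = a <;> by_cases hB : e = b <;> by_cases hab : a = b <;>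
      simp [PySem.Dict.getD_modify, hA, hB, hab, h3] <;> simp_all
  · have h1 : s1 > s2 := h
    have h2 : ¬ s2 > s1 := by omega
    have h3 : ¬ s2 = s1 := by omega
    have h4 : ¬ s1 = s2 := by omega
    by_cases hA : e = a <;> by_cases hB : e = b <;> by_cases hab : a = b <;>
      simp [PySem.Dict.getD_modify, hA, hB, hab, h1, h2, h3, h4] <;> simp_all

theorem foldl_pvUpdStep_getD (l : List (String × Int × String × Int))
    (d : PySem.Dict String (List Int)) (e : String) :
    (l.foldl pvUpdStep d).getD e [] = d.getD e [] ++ l.flatMap (pvGain e) := by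
  induction l generalizing d with
  | nil => simp
  | cons x t ih => simp [List.foldl_cons, ih, pvUpdStep_getD]

theorem pvUpdStep_keys (d : PySem.Dict String (List Int)) (x : String × Int × String × Int)
    (h1 : d.contains x.1 = true) (h2 : d.contains x.2.2.1 = true) :
    (pvUpdStep d x).keys = d.keys := by
  unfold pvUpdStep
  split_ifs <;>
    simp [PySem.Dict.keys_modify, PySem.Dict.keys_insert_of_contains,
      PySem.Dict.contains_modify, h1, h2]

theorem foldl_pvUpdStep_keys (l : List (String × Int × String × Int))
    (d : PySem.Dict String (List Int))
    (h : ∀ x ∈ l, d.contains x.1 = true ∧ d.contains x.2.2.1 = true) :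
    (l.foldl pvUpdStep d).keys = d.keys := by
  induction l generalizing d with
  | nil => simp
  | cons x t ih =>
    have hx := h x (by simp)
    have hk := pvUpdStep_keys d x hx.1 hx.2
    rw [List.foldl_cons, ih]
    · exact hk
    · intro y hy
      have hc := h y (List.mem_cons_of_mem _ hy)
      constructor
      · rw [PySem.Dict.contains_iff_mem_keys, hk, ← PySem.Dict.contains_iff_mem_keys]
        exact hc.1
      · rw [PySem.Dict.contains_iff_mem_keys, hk, ← PySem.Dict.contains_iff_mem_keys]
        exact hc.2

-- the initialization loop of A, flattened to one insert per team occurrence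
theorem init_eq_flat (l : List (String × Int × String × Int))
    (d : PySem.Dict String (List Int)) :
    l.foldl (fun d x => (d.insert x.1 ([] : List Int)).insert x.2.2.1 []) d =
      (l.flatMap (fun x => [x.1, x.2.2.1])).foldl (fun d k => d.insert k []) d := by
  induction l generalizing d with
  | nil => rfl
  | cons x t ih => simp [List.foldl_cons, ih]

theorem init_getD (ks : List String) (d : PySem.Dict String (List Int)) (e : String)
    (h : d.getD e [] = []) :
    (ks.foldl (fun d k => d.insert k ([] : List Int)) d).getD e [] = [] := by
  induction ks generalizing d with
  | nil => exact h
  | cons k t ih =>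
    rw [List.foldl_cons]
    exact ih _ (by rw [PySem.Dict.getD_insert]; split_ifs <;> simp [h])

-- ===== VERDICT (by name: the statement is the Claim_ definition above) =====
theorem diccionarioEquipos_spec : Claim_equal_diccionarioEquipos := by
  intro l _
  unfold Spec_diccionarioEquipos diccionarioEquipos diccionarioEquipos_alt
  show (List.foldl pvUpdStep
      (List.foldl (fun d x => (d.insert x.1 ([] : List Int)).insert x.2.2.1 []) PySem.Dict.empty l) l).items
    = (List.foldl (fun d e => d.insert e (pvPuntos l e)) PySem.Dict.empty
        (PySem.List.dedup (l.flatMap (fun x => [x.1, x.2.2.1])))).items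
  have hks : ∀ x ∈ l, x.1 ∈ l.flatMap (fun x => [x.1, x.2.2.1]) ∧
      x.2.2.1 ∈ l.flatMap (fun x => [x.1, x.2.2.1]) := by
    intro x hx
    exact ⟨List.mem_flatMap.2 ⟨x, hx, by simp⟩, List.mem_flatMap.2 ⟨x, hx, by simp⟩⟩
  rw [init_eq_flat l PySem.Dict.empty]
  have hkeys0 : (List.foldl (fun d k => d.insert k ([] : List Int)) PySem.Dict.empty
      (l.flatMap (fun x => [x.1, x.2.2.1]))).keys
      = PySem.Set.ofList (l.flatMap (fun x => [x.1, x.2.2.1])) := by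
    rw [PySem.Dict.keys_foldl_insert (l.flatMap (fun x => [x.1, x.2.2.1]))
      (fun _ _ => []) PySem.Dict.empty]
    simpa [PySem.Dict.keys_empty] using
      PySem.Set.update_nil_left (l.flatMap (fun x => [x.1, x.2.2.1]))
  have hmem : ∀ x ∈ l,
      (List.foldl (fun d k => d.insert k ([] : List Int)) PySem.Dict.empty
        (l.flatMap (fun x => [x.1, x.2.2.1]))).contains x.1 = true ∧
      (List.foldl (fun d k => d.insert k ([] : List Int)) PySem.Dict.empty
        (l.flatMap (fun x => [x.1, x.2.2.1]))).contains x.2.2.1 = true := by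
    intro x hx
    constructor <;> rw [PySem.Dict.contains_iff_mem_keys, hkeys0, PySem.Set.mem_ofList]
    · exact (hks x hx).1
    · exact (hks x hx).2
  have hkeys := foldl_pvUpdStep_keys l _ hmem
  rw [hkeys0] at hkeys
  have hnd : (List.foldl pvUpdStep
      (List.foldl (fun d k => d.insert k ([] : List Int)) PySem.Dict.empty
        (l.flatMap (fun x => [x.1, x.2.2.1]))) l).keys.Nodup := by
    rw [hkeys]; exact PySem.Set.nodup_ofList _
  have hB : (List.foldl (fun d e => d.insert e (pvPuntos l e)) PySem.Dict.empty
      (PySem.List.dedup (l.flatMap (fun x => [x.1, x.2.2.1])))).items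
      = (PySem.List.dedup (l.flatMap (fun x => [x.1, x.2.2.1]))).map
          (fun e => (e, pvPuntos l e)) := by
    simpa using PySem.Dict.items_foldl_insert_fresh
      (PySem.List.dedup (l.flatMap (fun x => [x.1, x.2.2.1]))) (fun e => e)
      (fun e => pvPuntos l e) PySem.Dict.empty
      (fun _ _ => PySem.Dict.contains_empty _)
      (by simpa using PySem.List.nodup_dedup (l.flatMap (fun x => [x.1, x.2.2.1])))
  rw [PySem.Dict.items_eq_map_keys _ hnd [], hkeys, hB, PySem.List.dedup_eq_ofList]
  refine List.map_congr_left (fun e _ => ?_)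
  rw [foldl_pvUpdStep_getD, init_getD _ PySem.Dict.empty e (PySem.Dict.getD_empty e []),
    pvPuntos_eq_flatMap]
  simp
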